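-- pv_equiv track=rewrite | github.com/century-arcade/xd | scripts/create_index.py | parse_xd_minimal
-- ===== SOURCE A (Python) =====
-- def parse_xd_minimal(contents):
--     """Fast minimal parse: extract grid and 1A/1D. Stops reading as early as possible."""
--     grid_rows = []
--     answer_1a = ""
--     answer_1d = ""
--     section = 0
--     blank_run = 2  # start high to trigger first section
--
--     for line in contents.splitlines():
--         stripped = line.strip()
--         if not stripped:
--             blank_run += 1
--             continue
--
--         if blank_run >= 2:
--             section += 1
--             blank_run = 0
--         else:
--             blank_run = 0
--
--         if section == 2:
--             grid_rows.append(stripped)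
--         elif section == 3:
--             idx = stripped.find(".")
--             if idx > 0:
--                 pos = stripped[:idx].strip()
--                 if pos in ("A1", "D1"):
--                     ans_idx = stripped.rfind("~")
--                     answer = stripped[ans_idx + 1:].strip() if ans_idx > 0 else ""
--                     if pos == "A1":
--                         answer_1a = answer
--                     else:
--                         answer_1d = answer
--                     if answer_1a and answer_1d:
--                         break
--                 elif pos > "D1":
--                     break  # past D1, stop looking
--         elif section > 3:
--             break
--
--     width = len(grid_rows[0]) if grid_rows else 0
--     height = len(grid_rows)
--     grid_flat = "".join(grid_rows)
--     return grid_flat, width, height, answer_1a, answer_1d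
-- ===== SOURCE B (Python) =====
-- def _scan_clues(lines):
--     answer_1a = ""
--     answer_1d = ""
--     for stripped in lines:
--         idx = stripped.find(".")
--         if idx > 0:
--             pos = stripped[:idx].strip()
--             if pos in ("A1", "D1"):
--                 ans_idx = stripped.rfind("~")
--                 answer = stripped[ans_idx + 1:].strip() if ans_idx > 0 else ""
--                 if pos == "A1":
--                     answer_1a = answer
--                 else:
--                     answer_1d = answer
--                 if answer_1a and answer_1d:
--                     break
--             elif pos > "D1":
--                 break
--     return answer_1a, answer_1d
--
--
-- def parse_xd_minimal(contents):
--     """Two-phase parse: split into sections first, then read grid/clues from sections 2 and 3."""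
--     sections = []
--     cur = None
--     blank_run = 2
--     for line in contents.splitlines():
--         stripped = line.strip()
--         if not stripped:
--             blank_run += 1
--             continue
--         if blank_run >= 2:
--             if cur is not None:
--                 sections.append(cur)
--             cur = []
--         blank_run = 0
--         cur.append(stripped)
--     if cur is not None:
--         sections.append(cur)
--
--     grid_rows = sections[1] if len(sections) >= 2 else []
--     clue_lines = sections[2] if len(sections) >= 3 else []
--     answer_1a, answer_1d = _scan_clues(clue_lines)
--
--     width = len(grid_rows[0]) if grid_rows else 0
--     height = len(grid_rows)
--     return "".join(grid_rows), width, height, answer_1a, answer_1d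
-- ===== Notes on version B (the rewrite author's own statement) =====
-- stated objective: alternative
-- what changed: A's single-pass five-variable state machine (section counter, blank_run, inline clue handling with early breaks) is re-decomposed into two phases: first split all lines into sections by the >=2-blank-line rule, then take section 2 as the grid and run the A1/D1 clue scan (same per-line logic and early breaks) over section 3 only.
import Mathlib
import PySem

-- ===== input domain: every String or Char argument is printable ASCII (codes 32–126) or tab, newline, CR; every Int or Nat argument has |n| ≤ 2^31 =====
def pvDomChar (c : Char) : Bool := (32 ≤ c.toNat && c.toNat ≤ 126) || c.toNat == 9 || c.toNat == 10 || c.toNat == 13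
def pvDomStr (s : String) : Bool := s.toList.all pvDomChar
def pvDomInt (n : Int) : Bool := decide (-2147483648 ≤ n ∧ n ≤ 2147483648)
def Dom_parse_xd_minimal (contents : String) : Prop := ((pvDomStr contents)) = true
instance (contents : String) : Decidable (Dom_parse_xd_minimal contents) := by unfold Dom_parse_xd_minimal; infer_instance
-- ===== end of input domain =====

-- B re-decomposes A's one-pass state machine into two phases (split into sections, then read
-- sections 2 and 3); same return value, objective: alternative decomposition (not faster).

-- ===== PORT A =====
-- A's single for-loop as structural recursion over the lines, carrying A's exact state
-- (grid_rows, answer_1a, answer_1d, section, blank_run); early 'break' returns the state.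
def parse_xd_minimal_loop : List String → List String → String → String → Nat → Nat → List String × String × String
  | [], grid, a1, d1, _, _ => (grid, a1, d1)
  | line :: rest, grid, a1, d1, sec, br =>
    let stripped := PySem.Str.strip line
    if stripped = "" then
      parse_xd_minimal_loop rest grid a1 d1 sec (br + 1)
    else
      let sec := if 2 ≤ br then sec + 1 else sec
      if sec = 2 then
        parse_xd_minimal_loop rest (grid ++ [stripped]) a1 d1 sec 0
      else if sec = 3 then
        let idx := PySem.Str.find stripped "."
        if 0 < idx then
          let pos := PySem.Str.strip (PySem.Str.slice stripped none (some idx))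
          if pos = "A1" ∨ pos = "D1" then
            let ans_idx := PySem.Str.rfind stripped "~"
            let answer := if 0 < ans_idx then PySem.Str.strip (PySem.Str.slice stripped (some (ans_idx + 1)) none) else ""
            let a1' := if pos = "A1" then answer else a1
            let d1' := if pos = "A1" then d1 else answer
            if a1' ≠ "" ∧ d1' ≠ "" then (grid, a1', d1')
            else parse_xd_minimal_loop rest grid a1' d1' sec 0
          else if "D1" < pos then (grid, a1, d1)
          else parse_xd_minimal_loop rest grid a1 d1 sec 0
        else parse_xd_minimal_loop rest grid a1 d1 sec 0
      else if 3 < sec then (grid, a1, d1)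
      else parse_xd_minimal_loop rest grid a1 d1 sec 0

def parse_xd_minimal (contents : String) : String × Int × Int × String × String :=
  let r := parse_xd_minimal_loop (PySem.Str.splitlines contents) [] "" "" 0 2
  let grid_rows := r.1
  let width : Int := match grid_rows with | [] => 0 | g :: _ => (PySem.Str.len g : Int)
  let height : Int := (grid_rows.length : Int)
  (PySem.Str.join "" grid_rows, width, height, r.2.1, r.2.2)

-- ===== PORT B =====
-- B phase 2: scan the clue section's lines for A1/D1 (same per-line logic, early breaks kept).
def scan_clues : List String → String → String → String × String
  | [], a1, d1 => (a1, d1)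
  | stripped :: rest, a1, d1 =>
    let idx := PySem.Str.find stripped "."
    if 0 < idx then
      let pos := PySem.Str.strip (PySem.Str.slice stripped none (some idx))
      if pos = "A1" ∨ pos = "D1" then
        let ans_idx := PySem.Str.rfind stripped "~"
        let answer := if 0 < ans_idx then PySem.Str.strip (PySem.Str.slice stripped (some (ans_idx + 1)) none) else ""
        let a1' := if pos = "A1" then answer else a1
        let d1' := if pos = "A1" then d1 else answer
        if a1' ≠ "" ∧ d1' ≠ "" then (a1', d1')
        else scan_clues rest a1' d1'
      else if "D1" < pos then (a1, d1)
      else scan_clues rest a1 d1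
    else scan_clues rest a1 d1

-- B phase 1: split the stripped non-blank lines into sections (a run of ≥2 blank lines
-- separates sections); Python's loop as structural recursion over (sections, cur, blank_run).
-- (cur is never 'none' with blank_run < 2 on runs from the initial state; '.getD []' is inert there.)
def split_go : List String → List (List String) → Option (List String) → Nat → List (List String)
  | [], sections, cur, _ =>
    (match cur with | some c => sections ++ [c] | none => sections)
  | line :: rest, sections, cur, blank_run =>
    let stripped := PySem.Str.strip line
    if stripped = "" then
      split_go rest sections cur (blank_run + 1)
    else if 2 ≤ blank_run then
      split_go rest (match cur with | some c => sections ++ [c] | none => sections) (some [stripped]) 0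
    else
      split_go rest sections (some (cur.getD [] ++ [stripped])) 0

def parse_xd_minimal_alt (contents : String) : String × Int × Int × String × String :=
  let sections := split_go (PySem.Str.splitlines contents) [] none 2
  let grid_rows := if 2 ≤ sections.length then sections.getD 1 [] else []
  let clue_lines := if 3 ≤ sections.length then sections.getD 2 [] else []
  let p := scan_clues clue_lines "" ""
  let width : Int := match grid_rows with | [] => 0 | g :: _ => (PySem.Str.len g : Int)
  let height : Int := (grid_rows.length : Int)
  (PySem.Str.join "" grid_rows, width, height, p.1, p.2)

-- ===== PRECONDITION & SPEC =====
def Spec_parse_xd_minimal (contents : String) (out : String × Int × Int × String × String) : Prop := out = parse_xd_minimal_alt contents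
instance (contents : String) (out : String × Int × Int × String × String) : Decidable (Spec_parse_xd_minimal contents out) := by unfold Spec_parse_xd_minimal; infer_instance

-- ===== CLAIM (what is proved, stated in full; the proofs are below) =====
def Claim_equal_parse_xd_minimal : Prop := ∀ (contents : String), Dom_parse_xd_minimal contents → Spec_parse_xd_minimal contents (parse_xd_minimal contents)

-- ===== LEMMAS AND PROOFS =====

-- Normal form: (rest of the current section, the later sections) of a line list, given the
-- current blank-run count.
def pvSecsC : List String → Nat → List String × List (List String)
  | [], _ => ([], [])
  | l :: ls, br =>
    let s := PySem.Str.strip l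
    if s = "" then pvSecsC ls (br + 1)
    else
      let r := pvSecsC ls 0
      if 2 ≤ br then ([], (s :: r.1) :: r.2)
      else (s :: r.1, r.2)

theorem pvSecsC_fst_nil (ls : List String) (br : Nat) (h : 2 ≤ br) : (pvSecsC ls br).1 = [] := by
  induction ls generalizing br with
  | nil => rfl
  | cons l ls ih =>
    simp only [pvSecsC]
    by_cases hs : PySem.Str.strip l = ""
    · simpa [hs] using ih _ (by omega)
    · simp [hs, h]

-- What A's loop computes on whole later sections.
def pvProc : List String → String → String → Nat → List (List String) → List String × String × String
  | grid, a1, d1, _, [] => (grid, a1, d1)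
  | grid, a1, d1, sec, c :: rest =>
    let s := sec + 1
    if s = 2 then pvProc (grid ++ c) a1 d1 s rest
    else if s = 3 then ((grid, (scan_clues c a1 d1).1, (scan_clues c a1 d1).2) : List String × String × String)
    else if 3 < s then (grid, a1, d1)
    else pvProc grid a1 d1 s rest

-- What A's loop computes from a mid-section state.
def pvCont (grid : List String) (a1 d1 : String) (sec : Nat) (c : List String) (ss : List (List String)) : List String × String × String :=
  if sec = 2 then pvProc (grid ++ c) a1 d1 2 ss
  else if sec = 3 then (grid, (scan_clues c a1 d1).1, (scan_clues c a1 d1).2)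
  else if 3 < sec then (grid, a1, d1)
  else pvProc grid a1 d1 sec ss

theorem loopA_eq_cont (ls : List String) : ∀ (grid : List String) (a1 d1 : String) (sec br : Nat),
    parse_xd_minimal_loop ls grid a1 d1 sec br
      = pvCont grid a1 d1 sec (pvSecsC ls br).1 (pvSecsC ls br).2 := by
  induction ls with
  | nil =>
    intro grid a1 d1 sec br
    simp only [parse_xd_minimal_loop, pvSecsC, pvCont]
    split_ifs <;> simp [pvProc, scan_clues]
  | cons l ls ih =>
    intro grid a1 d1 sec br
    simp only [parse_xd_minimal_loop, pvSecsC]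
    by_cases hs : PySem.Str.strip l = ""
    · rw [if_pos hs, if_pos hs]
      exact ih grid a1 d1 sec (br + 1)
    · rw [if_neg hs, if_neg hs]
      by_cases hbr : 2 ≤ br
      · rw [if_pos hbr, if_pos hbr]
        rcases sec with _ | _ | _ | _ | n
        · -- sec = 0 → 1
          simp [ih, pvCont, pvProc]
        · -- sec = 1 → 2
          simp [ih, pvCont, pvProc]
        · -- sec = 2 → 3: clue step
          simp only [pvCont, pvProc, scan_clues]
          norm_num
          split_ifs <;> first
            | rfl
            | (rw [ih]; simp [pvCont])
        · -- sec = 3 → 4: break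
          simp [pvCont, pvProc, scan_clues]
        · -- sec ≥ 4 → break
          simp [pvCont, pvProc]
      · rw [if_neg hbr, if_neg hbr]
        rcases sec with _ | _ | _ | _ | n
        · simp [ih, pvCont, pvProc]
        · simp [ih, pvCont, pvProc]
        · -- sec = 2: collect grid line
          simp [ih, pvCont, pvProc]
        · -- sec = 3: clue step
          simp only [pvCont, pvProc, scan_clues]
          norm_num
          split_ifs <;> first
            | rfl
            | (rw [ih]; simp [pvCont])
        · simp [pvCont, pvProc]

theorem split_go_eq_secsC (ls : List String) :
    (∀ (sections : List (List String)) (br : Nat), 2 ≤ br →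
        split_go ls sections none br = sections ++ (pvSecsC ls br).2)
    ∧ (∀ (sections : List (List String)) (c0 : List String) (br : Nat),
        split_go ls sections (some c0) br
          = sections ++ (c0 ++ (pvSecsC ls br).1) :: (pvSecsC ls br).2) := by
  induction ls with
  | nil =>
    refine ⟨fun sections br h => by simp [split_go, pvSecsC], fun sections c0 br => by simp [split_go, pvSecsC]⟩
  | cons l ls ih =>
    obtain ⟨ih1, ih2⟩ := ih
    constructor
    · intro sections br h
      simp only [split_go, pvSecsC]
      by_cases hs : PySem.Str.strip l = ""
      · simpa [hs] using ih1 sections (br + 1) (by omega)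
      · simp [hs, h, ih2]
    · intro sections c0 br
      simp only [split_go, pvSecsC]
      by_cases hs : PySem.Str.strip l = ""
      · simpa [hs] using ih2 sections c0 (br + 1)
      · by_cases hbr : 2 ≤ br
        · simp [hs, hbr, ih2]
        · simp [hs, hbr, ih2]

theorem pvProc_zero_eq (ss : List (List String)) :
    pvProc [] "" "" 0 ss
      = ((if 2 ≤ ss.length then ss.getD 1 [] else []),
         (scan_clues (if 3 ≤ ss.length then ss.getD 2 [] else []) "" "").1,
         (scan_clues (if 3 ≤ ss.length then ss.getD 2 [] else []) "" "").2) := by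
  rcases ss with _ | ⟨a, _ | ⟨b, _ | ⟨c, rest⟩⟩⟩ <;> simp [pvProc, scan_clues]

-- ===== VERDICT (by name: the statement is the Claim_ definition above) =====
theorem parse_xd_minimal_spec : Claim_equal_parse_xd_minimal := by
  intro contents _
  unfold Spec_parse_xd_minimal parse_xd_minimal parse_xd_minimal_alt
  have hA := loopA_eq_cont (PySem.Str.splitlines contents) [] "" "" 0 2
  have hB := (split_go_eq_secsC (PySem.Str.splitlines contents)).1 [] 2 (by omega)
  have h1 : (pvSecsC (PySem.Str.splitlines contents) 2).1 = [] := pvSecsC_fst_nil _ 2 (by omega)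
  rw [hA, hB, h1]
  simp only [pvCont, List.nil_append]
  rw [pvProc_zero_eq]
  norm_num
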